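-- pv_equiv track=rewrite | github.com/Miragaia/FP | treino/positionDifferenceFirstLastLargest.py | positionDifferenceFirstLastLargest
-- ===== SOURCE A (Python) =====
-- def positionDifferenceFirstLastLargest(lst):
--     maxn=0
--     index=0
--     for n in lst:
--         if (maxn < n) or (index==0):
--             maxn=n
--             firstindex=index
--         if maxn==n:
--             lastindex= index
--         index+=1
--     diff= lastindex - firstindex
--     return diff
-- ===== SOURCE B (Python) =====
-- def positionDifferenceFirstLastLargest(lst):
--     m = max(lst)
--     first = lst.index(m)
--     last = len(lst) - 1 - lst[::-1].index(m)
--     return last - first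
-- ===== Notes on version B (the rewrite author's own statement) =====
-- stated objective: faster
-- what changed: Replaces the single hand-written index-tracking loop with closed-form built-ins: m = max(lst), first = lst.index(m), last via lst[::-1].index(m).
import Mathlib
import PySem

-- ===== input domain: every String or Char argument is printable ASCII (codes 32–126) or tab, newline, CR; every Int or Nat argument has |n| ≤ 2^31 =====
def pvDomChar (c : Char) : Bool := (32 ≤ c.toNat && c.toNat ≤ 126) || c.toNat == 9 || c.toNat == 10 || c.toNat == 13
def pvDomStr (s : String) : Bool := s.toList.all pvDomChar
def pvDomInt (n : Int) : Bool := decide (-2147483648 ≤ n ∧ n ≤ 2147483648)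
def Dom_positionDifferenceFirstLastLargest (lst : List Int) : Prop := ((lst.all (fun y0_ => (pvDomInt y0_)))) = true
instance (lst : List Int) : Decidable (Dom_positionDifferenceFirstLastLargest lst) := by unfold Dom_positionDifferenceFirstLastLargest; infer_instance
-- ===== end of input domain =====

-- ===== PORT A =====
-- Python-in-Lean: A's single loop over lst with running maxn, index, and optional
-- firstindex/lastindex locals (none = Python's unbound local; Pre_ excludes the empty
-- list, the only input where they stay unbound and A raises UnboundLocalError).
def pvStepA (st : Int × Int × Option Int × Option Int) (n : Int) :
    Int × Int × Option Int × Option Int :=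
  let maxn := st.1
  let index := st.2.1
  let firstindex := st.2.2.1
  let lastindex := st.2.2.2
  let p := if maxn < n ∨ index = 0 then (n, some index) else (maxn, firstindex)
  let lastindex := if p.1 = n then some index else lastindex
  (p.1, index + 1, p.2, lastindex)

def positionDifferenceFirstLastLargest (lst : List Int) : Int :=
  let s := lst.foldl pvStepA (0, 0, none, none)
  -- diff = lastindex - firstindex; getD 0 is unreachable under Pre_ (lst ≠ [])
  s.2.2.2.getD 0 - s.2.2.1.getD 0


-- ===== PORT B =====
def positionDifferenceFirstLastLargest_alt (lst : List Int) : Int :=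
  match PySem.List.max? lst (fun x => x) with
  | none => 0  -- max([]) raises ValueError; excluded by Pre_
  | some m =>
    let first : Int := ((PySem.List.index? lst m).getD 0 : Nat)
    let rev := (PySem.List.slice? lst none none (-1)).getD []   -- lst[::-1]
    let last : Int := (lst.length : Int) - 1 - ((PySem.List.index? rev m).getD 0 : Nat)
    last - first


-- ===== PRECONDITION & SPEC =====
-- On the empty list A raises UnboundLocalError (B raises ValueError); Pre_ excludes it.
def Pre_positionDifferenceFirstLastLargest (lst : List Int) : Prop := lst ≠ []
instance (lst : List Int) : Decidable (Pre_positionDifferenceFirstLastLargest lst) := by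
  unfold Pre_positionDifferenceFirstLastLargest; infer_instance
def pvWitness_positionDifferenceFirstLastLargest : List Int := [3, 1, 3, 2]

def Spec_positionDifferenceFirstLastLargest (lst : List Int) (out : Int) : Prop := out = positionDifferenceFirstLastLargest_alt lst
instance (lst : List Int) (out : Int) : Decidable (Spec_positionDifferenceFirstLastLargest lst out) := by unfold Spec_positionDifferenceFirstLastLargest; infer_instance

-- ===== CLAIM (what is proved, stated in full; the proofs are below) =====
def Claim_equal_positionDifferenceFirstLastLargest : Prop := ∀ (lst : List Int), Dom_positionDifferenceFirstLastLargest lst → Pre_positionDifferenceFirstLastLargest lst → Spec_positionDifferenceFirstLastLargest lst (positionDifferenceFirstLastLargest lst)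

-- ===== LEMMAS AND PROOFS =====

-- ===== VERDICT (by name: the statement is the Claim_ definition above) =====
lemma pvFoldA_char (x : Int) (xs : List Int) :
    (x :: xs).foldl pvStepA (0, 0, none, none) =
      (let p := x :: xs
       let m := xs.foldl max x
       (m, (p.length : Int),
        some (((PySem.List.index? p m).getD 0 : Nat) : Int),
        some ((p.length : Int) - 1 - (((PySem.List.index? p.reverse m).getD 0 : Nat) : Int)))) := by
  induction xs using List.reverseRecOn with
  | nil =>
      simp [pvStepA]
  | append_singleton ys n ih =>
      have hcons : x :: (ys ++ [n]) = (x :: ys) ++ [n] := by simp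
      rw [hcons, List.foldl_append, List.foldl_append, ih]
      have hmax? : PySem.List.max? (x :: ys) (fun y => y) = some (ys.foldl max x) :=
        PySem.List.max?_id_cons x ys
      have hmem : (ys.foldl max x) ∈ (x :: ys) := PySem.List.max?_mem hmax?
      have hub : ∀ y ∈ x :: ys, y ≤ ys.foldl max x := by
        have := PySem.List.max?_isMax hmax?; simpa using this
      have hlen : ¬ ((x :: ys).length : Int) = 0 := by simp only [List.length_cons]; push_cast; omega
      have hrev : ((x :: ys) ++ [n]).reverse = n :: (x :: ys).reverse := by simp
      by_cases hlt : ys.foldl max x < n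
      · have hmn : max (ys.foldl max x) n = n := max_eq_right (le_of_lt hlt)
        have hnot : n ∉ (x :: ys) := fun h => absurd (hub n h) (not_le.mpr hlt)
        have hidx := PySem.List.index?_append_singleton_self (x :: ys) n hnot
        simp only [pvStepA, List.foldl, hmn, hlt, hrev, hidx,
          PySem.List.index?_cons_self, true_or, if_pos]
        simp [List.length_append]
      · have hmn : max (ys.foldl max x) n = ys.foldl max x := max_eq_left (not_lt.mp hlt)
        have hidxF := PySem.List.index?_append_of_mem [n] hmem
        by_cases heq : ys.foldl max x = n
        · subst heq
          simp only [pvStepA, List.foldl, lt_self_iff_false, hlen, false_or, if_false]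
          rw [hmn, hidxF, hrev, PySem.List.index?_cons_self]
          simp [List.length_append]
        · have hmemr : (ys.foldl max x) ∈ (x :: ys).reverse := List.mem_reverse.mpr hmem
          obtain ⟨i, hi⟩ : ∃ i, PySem.List.index? (x :: ys).reverse (ys.foldl max x) = some i := by
            have := (PySem.List.index?_isSome_iff ((x :: ys).reverse) (ys.foldl max x)).mpr hmemr
            exact Option.isSome_iff_exists.mp this
          have hil : i < (x :: ys).reverse.length := by
            obtain ⟨hk, -, -⟩ := PySem.List.getElem_of_index?_eq_some hi
            exact hk
          have hne : n ≠ ys.foldl max x := fun h => heq h.symm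
          have hidxL := PySem.List.index?_cons_of_ne ((x :: ys).reverse) hne
          simp only [pvStepA, List.foldl, hmn, hlt, hlen, hidxF, hrev, hidxL, hi, heq,
            false_or, if_false]
          simp [List.length_append] at hil ⊢

theorem positionDifferenceFirstLastLargest_spec : Claim_equal_positionDifferenceFirstLastLargest := by
  intro lst _ hpre
  unfold Spec_positionDifferenceFirstLastLargest
  match lst, hpre with
  | x :: xs, _ =>
    simp only [positionDifferenceFirstLastLargest, positionDifferenceFirstLastLargest_alt,
      pvFoldA_char, PySem.List.max?_id_cons, PySem.List.slice?_none_none_neg_one]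
    simp
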